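-- pv_equiv track=rewrite | github.com/mecebeci/network-config-manager | src/metrics_processor.py | _count_interface_status
-- ===== SOURCE A (Python) =====
-- from typing import Dict, List, Optional, Tuple, Any
--
-- def _count_interface_status(
--
--     interfaces: List[Dict[str, Any]]
-- ) -> Dict[str, int]:
--     """
--     Count interfaces by operational status.
--
--     Args:
--         interfaces: List of interface dictionaries
--
--     Returns:
--         Dictionary with counts: {'up': count, 'down': count, 'other': count}
--     """
--     counts = {'up': 0, 'down': 0, 'other': 0}
--
--     for iface in interfaces:
--         status = iface.get('oper_status', 'unknown').lower()
--         if status == 'up':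
--             counts['up'] += 1
--         elif status == 'down':
--             counts['down'] += 1
--         else:
--             counts['other'] += 1
--
--     return counts
-- ===== SOURCE B (Python) =====
-- from typing import Dict, List, Optional, Tuple, Any
--
-- def _count_interface_status(
--     interfaces: List[Dict[str, Any]]
-- ) -> Dict[str, int]:
--     up = sum(1 for i in interfaces if i.get('oper_status', 'unknown').lower() == 'up')
--     down = sum(1 for i in interfaces if i.get('oper_status', 'unknown').lower() == 'down')
--     return {'up': up, 'down': down, 'other': len(interfaces) - up - down}
-- ===== Notes on version B (the rewrite author's own statement) =====
-- stated objective: simpler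
-- what changed: Replaced the single three-way-branching dict-update loop by two filtered counts (up, down) and a closed-form remainder other = len - up - down, assembling the result dict once.
import Mathlib
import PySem

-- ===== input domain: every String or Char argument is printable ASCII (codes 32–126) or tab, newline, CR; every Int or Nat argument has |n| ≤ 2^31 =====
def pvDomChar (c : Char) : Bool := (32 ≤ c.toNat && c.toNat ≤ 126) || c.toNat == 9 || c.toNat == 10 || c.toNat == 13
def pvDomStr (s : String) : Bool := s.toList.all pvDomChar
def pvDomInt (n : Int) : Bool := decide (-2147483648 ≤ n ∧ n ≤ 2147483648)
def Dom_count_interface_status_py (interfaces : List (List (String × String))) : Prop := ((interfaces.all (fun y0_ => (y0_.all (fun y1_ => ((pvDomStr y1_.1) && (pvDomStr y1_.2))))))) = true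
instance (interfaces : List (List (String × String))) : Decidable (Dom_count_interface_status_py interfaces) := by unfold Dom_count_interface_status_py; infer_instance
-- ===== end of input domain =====

-- B replaces A's three-way-branch dict-update loop by two filtered counts plus a
-- closed-form remainder; objective: simpler.

-- ===== PORT A =====
-- literal transliteration of A: a counts dict seeded with the three keys, one pass
-- with a three-way branch incrementing the matching entry.
def count_interface_status_py (interfaces : List (List (String × String))) : List (String × Int) :=
  let counts : PySem.Dict String Int :=
    ((PySem.Dict.empty.insert "up" 0).insert "down" 0).insert "other" 0
  let counts := interfaces.foldl (fun counts iface =>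
    let status := PySem.Str.lower ((PySem.Dict.mk iface).getD "oper_status" "unknown")
    if status = "up" then counts.insert "up" (counts.getD "up" 0 + 1)
    else if status = "down" then counts.insert "down" (counts.getD "down" 0 + 1)
    else counts.insert "other" (counts.getD "other" 0 + 1)) counts
  counts.items

-- ===== PORT B =====
-- transliteration of Source B: two filtered counts, third bucket by arithmetic.
def count_interface_status_py_alt (interfaces : List (List (String × String))) : List (String × Int) :=
  let up : Int := (interfaces.countP (fun i =>
    PySem.Str.lower ((PySem.Dict.mk i).getD "oper_status" "unknown") == "up") : Int)
  let down : Int := (interfaces.countP (fun i =>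
    PySem.Str.lower ((PySem.Dict.mk i).getD "oper_status" "unknown") == "down") : Int)
  [("up", up), ("down", down), ("other", PySem.List.len interfaces - up - down)]

-- ===== PRECONDITION & SPEC =====
def Spec_count_interface_status_py (interfaces : List (List (String × String))) (out : List (String × Int)) : Prop := out = count_interface_status_py_alt interfaces
instance (interfaces : List (List (String × String))) (out : List (String × Int)) : Decidable (Spec_count_interface_status_py interfaces out) := by unfold Spec_count_interface_status_py; infer_instance

-- ===== CLAIM (what is proved, stated in full; the proofs are below) =====
def Claim_equal_count_interface_status_py : Prop := ∀ (interfaces : List (List (String × String))), Dom_count_interface_status_py interfaces → Spec_count_interface_status_py interfaces (count_interface_status_py interfaces)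

-- ===== LEMMAS AND PROOFS =====

-- status of one interface, used only by the proofs to abbreviate goals
def pvStatus (iface : List (String × String)) : String :=
  PySem.Str.lower ((PySem.Dict.mk iface).getD "oper_status" "unknown")

-- loop invariant for A's fold: the counts dict keeps its three entries, each
-- incremented by the number of matching interfaces.
lemma pvLoop (l : List (List (String × String))) (a b c : Int) :
    (l.foldl (fun counts iface =>
      if pvStatus iface = "up" then counts.insert "up" (counts.getD "up" 0 + 1)
      else if pvStatus iface = "down" then counts.insert "down" (counts.getD "down" 0 + 1)
      else counts.insert "other" (counts.getD "other" 0 + 1))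
      (PySem.Dict.mk [("up", a), ("down", b), ("other", c)])).items
    = [("up", a + (l.countP (fun i => pvStatus i == "up") : Int)),
       ("down", b + (l.countP (fun i => pvStatus i == "down") : Int)),
       ("other", c + ((l.length : Int)
          - (l.countP (fun i => pvStatus i == "up") : Int)
          - (l.countP (fun i => pvStatus i == "down") : Int)))] := by
  induction l generalizing a b c with
  | nil => simp
  | cons x xs ih =>
    simp only [List.foldl_cons, List.countP_cons, List.length_cons]
    by_cases hu : pvStatus x = "up"
    · have : (PySem.Dict.mk [("up", a), ("down", b), ("other", c)]).insert "up"
          ((PySem.Dict.mk [("up", a), ("down", b), ("other", c)]).getD "up" 0 + 1)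
          = PySem.Dict.mk [("up", a + 1), ("down", b), ("other", c)] := by
        apply PySem.Dict.ext; simp [PySem.Dict.items_insert, PySem.Dict.getD_eq_get?_getD,
          PySem.Dict.get?_mk_cons, PySem.Dict.contains]
      have hd : pvStatus x ≠ "down" := by simp [hu]
      rw [if_pos hu, this, ih]
      simp only [hu, hd, List.cons.injEq, Prod.mk.injEq, and_true, true_and]
      and_intros <;> simp <;> push_cast <;> ring
    · by_cases hd : pvStatus x = "down"
      · have : (PySem.Dict.mk [("up", a), ("down", b), ("other", c)]).insert "down"
            ((PySem.Dict.mk [("up", a), ("down", b), ("other", c)]).getD "down" 0 + 1)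
            = PySem.Dict.mk [("up", a), ("down", b + 1), ("other", c)] := by
          apply PySem.Dict.ext; simp [PySem.Dict.items_insert, PySem.Dict.getD_eq_get?_getD,
            PySem.Dict.get?_mk_cons, PySem.Dict.contains]
        rw [if_neg hu, if_pos hd, this, ih]
        simp only [hu, hd, List.cons.injEq, Prod.mk.injEq, and_true, true_and]
        and_intros <;> simp [hu, hd] <;> push_cast <;> ring
      · have : (PySem.Dict.mk [("up", a), ("down", b), ("other", c)]).insert "other"
            ((PySem.Dict.mk [("up", a), ("down", b), ("other", c)]).getD "other" 0 + 1)
            = PySem.Dict.mk [("up", a), ("down", b), ("other", c + 1)] := by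
          apply PySem.Dict.ext; simp [PySem.Dict.items_insert, PySem.Dict.getD_eq_get?_getD,
            PySem.Dict.get?_mk_cons, PySem.Dict.contains]
        rw [if_neg hu, if_neg hd, this, ih]
        simp only [List.cons.injEq, Prod.mk.injEq, and_true, true_and]
        and_intros <;> simp [hu, hd] <;> push_cast <;> ring

-- ===== VERDICT (by name: the statement is the Claim_ definition above) =====
theorem count_interface_status_py_spec : Claim_equal_count_interface_status_py := by
  intro interfaces _
  unfold Spec_count_interface_status_py count_interface_status_py count_interface_status_py_alt
  have hs : ∀ i : List (String × String),
      PySem.Str.lower ((PySem.Dict.mk i).getD "oper_status" "unknown") = pvStatus i :=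
    fun _ => rfl
  have h0 : ((PySem.Dict.empty.insert "up" (0:Int)).insert "down" 0).insert "other" 0
      = PySem.Dict.mk [("up", 0), ("down", 0), ("other", 0)] := by decide
  simp only [hs, h0, pvLoop, PySem.List.len_eq, zero_add]
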